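-- pv_equiv track=rewrite | github.com/rohitbhintade/kiss_ai | src/kiss/tests/test_file_usage.py | _sort_suggestions
-- ===== SOURCE A (Python) =====
-- def _end_dist(text: str, q: str) -> int:
--     """Distance from end of path to end of rightmost query match."""
--     if not q:
--         return 0
--     pos = text.lower().rfind(q)
--     if pos < 0:
--         return len(text)
--     return len(text) - (pos + len(q))
--
-- def _sort_suggestions(
--     file_cache: list[str],
--     usage: dict[str, int],
--     q: str,
-- ) -> list[dict[str, str]]:
--     """Replicate the sorting logic from the /suggestions?mode=files endpoint.
--
--     Matches the actual production code in sorcar.py — all items start with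
--     type="file", frequent items get type="frequent".
--     """
--     frequent: list[dict[str, str]] = []
--     rest: list[dict[str, str]] = []
--     for path in file_cache:
--         if q and q not in path.lower():
--             continue
--         item = {"type": "file", "text": path}
--         if usage.get(path, 0) > 0:
--             frequent.append(item)
--         else:
--             rest.append(item)
--     # Build recency rank from insertion order in usage dict
--     # (last key = most recently used → rank 0).
--     _usage_keys = list(usage.keys())
--     _recency = {k: i for i, k in enumerate(reversed(_usage_keys))}
--     _n = len(_usage_keys)
--     frequent.sort(
--         key=lambda m: (
--             _end_dist(m["text"], q),
--             _recency.get(m["text"], _n),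
--             -usage.get(m["text"], 0),
--         )
--     )
--     rest.sort(key=lambda m: _end_dist(m["text"], q))
--     for f in frequent:
--         f["type"] = "frequent"
--     return (frequent + rest)[:20]
-- ===== SOURCE B (Python) =====
-- def _end_dist(text: str, q: str) -> int:
--     if not q:
--         return 0
--     pos = text.lower().rfind(q)
--     if pos < 0:
--         return len(text)
--     return len(text) - (pos + len(q))
--
-- def _sort_suggestions(file_cache, usage, q):
--     # streaming top-20 selection: no sort call at all; each matching item is
--     # inserted at its place in a sorted buffer that is trimmed to 20 entries,
--     # so the buffer never grows beyond the answer size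
--     keys = list(usage.keys())
--     n = len(keys)
--     rec = {k: i for i, k in enumerate(reversed(keys))}
--     buf = []  # (key, item) pairs, kept sorted by key, at most 20 long
--     for path in file_cache:
--         if q and q not in path.lower():
--             continue
--         if usage.get(path, 0) > 0:
--             k = (0, _end_dist(path, q), rec.get(path, n), -usage.get(path, 0))
--             item = {"type": "frequent", "text": path}
--         else:
--             k = (1, _end_dist(path, q), 0, 0)
--             item = {"type": "file", "text": path}
--         i = 0
--         while i < len(buf) and not k < buf[i][0]:
--             i += 1
--         buf.insert(i, (k, item))
--         del buf[20:]
--     return [item for _, item in buf]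
-- ===== Notes on version B (the rewrite author's own statement) =====
-- stated objective: alternative
-- what changed: A builds two partition lists, runs two full sorts with separate keys and a retype pass; B does streaming top-k selection: a single pass over file_cache inserts each matching item (with a composite group/dist/recency/-usage key) into its place in a sorted buffer trimmed to 20 entries, so no sort call and no buffer larger than the answer.
import Mathlib
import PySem

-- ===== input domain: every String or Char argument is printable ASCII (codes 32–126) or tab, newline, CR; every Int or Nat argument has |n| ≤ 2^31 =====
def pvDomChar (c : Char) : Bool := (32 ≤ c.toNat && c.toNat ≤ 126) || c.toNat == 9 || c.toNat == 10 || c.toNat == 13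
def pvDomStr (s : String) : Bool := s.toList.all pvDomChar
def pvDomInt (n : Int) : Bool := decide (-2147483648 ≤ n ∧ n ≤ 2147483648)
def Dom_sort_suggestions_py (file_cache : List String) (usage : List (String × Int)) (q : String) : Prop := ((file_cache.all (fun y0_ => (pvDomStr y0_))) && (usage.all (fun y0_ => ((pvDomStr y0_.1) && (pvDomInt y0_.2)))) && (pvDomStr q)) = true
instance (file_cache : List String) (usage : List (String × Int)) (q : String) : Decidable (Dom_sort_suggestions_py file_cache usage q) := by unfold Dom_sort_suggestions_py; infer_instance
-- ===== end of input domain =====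

-- B replaces A's two partition lists, two full sorts and a retype pass by streaming top-20 selection:
-- one pass inserting each match into a sorted 20-entry buffer; same results, similar cost (objective: alternative).


-- ===== PORT A =====
-- _end_dist, shared helper of both Pythons
def pvEndDist (text : String) (q : String) : Int :=
  if q = "" then 0
  else
    let pos := PySem.Str.rfind (PySem.Str.lower text) q
    if pos < 0 then PySem.Str.len text
    else PySem.Str.len text - (pos + PySem.Str.len q)

-- Python's stable list.sort with a tuple key is not a single PySem primitive, so it is hand-ported
-- exactly as PySem models sorted (foldl of stable insertBy, cf. sorted_eq_foldl_insertBy), with the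
-- tuple comparison written out lexicographically — exact for Python's stable sort on int tuples.
def pvLt3 (a b : Int × Int × Int) : Bool :=
  a.1 < b.1 || (a.1 == b.1 && (a.2.1 < b.2.1 || (a.2.1 == b.2.1 && a.2.2 < b.2.2)))

def pvLt4 (a b : Int × Int × Int × Int) : Bool :=
  a.1 < b.1 || (a.1 == b.1 && pvLt3 a.2 b.2)

def pvSortBy {α : Type} (cmp : α → α → Bool) (xs : List α) : List α :=
  xs.foldl (fun acc x => PySem.List.insertBy cmp x acc) []

def sort_suggestions_py (file_cache : List String) (usage : List (String × Int)) (q : String) : List (List (String × String)) :=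
  let fr := file_cache.foldl
    (fun (acc : List (List (String × String)) × List (List (String × String))) path =>
      if q ≠ "" ∧ ¬ (PySem.Str.isIn q (PySem.Str.lower path)) then acc
      else
        let item := [("type", "file"), ("text", path)]
        if (PySem.Dict.mk usage).getD path 0 > 0 then (acc.1 ++ [item], acc.2)
        else (acc.1, acc.2 ++ [item]))
    ([], [])
  let usageKeys := PySem.Dict.keys (PySem.Dict.mk usage)
  let recency := (PySem.List.enumerate usageKeys.reverse).foldl
    (fun d p => PySem.Dict.insert d p.2 p.1) PySem.Dict.empty
  let n : Int := usageKeys.length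
  let keyF : List (String × String) → Int × Int × Int := fun m =>
    let t := (PySem.Dict.mk m).getD "text" ""
    (pvEndDist t q, recency.getD t n, -((PySem.Dict.mk usage).getD t 0))
  let frequent := pvSortBy (fun a b => pvLt3 (keyF a) (keyF b)) fr.1
  let rest := PySem.List.sorted fr.2 (fun m => pvEndDist ((PySem.Dict.mk m).getD "text" "") q)
  let frequent := frequent.map (fun f => (PySem.Dict.insert (PySem.Dict.mk f) "type" "frequent").items)
  (frequent ++ rest).take 20

-- ===== PORT B =====
-- the hand-written while-loop insertion of Source B (insert before the first strictly greater key) is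
-- exactly PySem.List.insertBy with the tuple comparison pvLt4; 'del buf[20:]' is List.take 20
def sort_suggestions_py_alt (file_cache : List String) (usage : List (String × Int)) (q : String) : List (List (String × String)) :=
  let keys := PySem.Dict.keys (PySem.Dict.mk usage)
  let n : Int := keys.length
  let rec_ := (PySem.List.enumerate keys.reverse).foldl
    (fun d p => PySem.Dict.insert d p.2 p.1) PySem.Dict.empty
  let buf := file_cache.foldl
    (fun (buf : List ((Int × Int × Int × Int) × List (String × String))) path =>
      if q ≠ "" ∧ ¬ (PySem.Str.isIn q (PySem.Str.lower path)) then buf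
      else
        let kd :=
          if (PySem.Dict.mk usage).getD path 0 > 0 then
            ((0, pvEndDist path q, rec_.getD path n, -((PySem.Dict.mk usage).getD path 0)),
             [("type", "frequent"), ("text", path)])
          else
            (((1 : Int), pvEndDist path q, (0 : Int), (0 : Int)),
             [("type", "file"), ("text", path)])
        (PySem.List.insertBy (fun a b => pvLt4 a.1 b.1) kd buf).take 20)
    []
  buf.map (fun p => p.2)

-- ===== PRECONDITION & SPEC =====
def Spec_sort_suggestions_py (file_cache : List String) (usage : List (String × Int)) (q : String) (out : List (List (String × String))) : Prop := out = sort_suggestions_py_alt file_cache usage q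
instance (file_cache : List String) (usage : List (String × Int)) (q : String) (out : List (List (String × String))) : Decidable (Spec_sort_suggestions_py file_cache usage q out) := by unfold Spec_sort_suggestions_py; infer_instance

-- ===== CLAIM (what is proved, stated in full; the proofs are below) =====
def Claim_equal_sort_suggestions_py : Prop := ∀ (file_cache : List String) (usage : List (String × Int)) (q : String), Dom_sort_suggestions_py file_cache usage q → Spec_sort_suggestions_py file_cache usage q (sort_suggestions_py file_cache usage q)

-- ===== LEMMAS AND PROOFS =====

-- generic facts about the stable-insertion engine PySem.List.insertBy
theorem insertBy_append_left {α : Type} (cmp : α → α → Bool) (x : α) (l1 l2 : List α)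
    (h : ∀ y ∈ l2, cmp x y = true) :
    PySem.List.insertBy cmp x (l1 ++ l2) = PySem.List.insertBy cmp x l1 ++ l2 := by
  induction l1 with
  | nil =>
    cases l2 with
    | nil => simp [PySem.List.insertBy]
    | cons y ys => simp [PySem.List.insertBy, h y (by simp)]
  | cons z l1 ih =>
    simp only [List.cons_append, PySem.List.insertBy]
    by_cases hc : cmp x z = true
    · simp [hc]
    · simp [hc, ih]

theorem insertBy_append_right {α : Type} (cmp : α → α → Bool) (x : α) (l1 l2 : List α)
    (h : ∀ y ∈ l1, cmp x y = false) :
    PySem.List.insertBy cmp x (l1 ++ l2) = l1 ++ PySem.List.insertBy cmp x l2 := by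
  induction l1 with
  | nil => simp
  | cons z l1 ih =>
    have hz : cmp x z = false := h z (by simp)
    simp only [List.cons_append, PySem.List.insertBy, hz]
    simp only [Bool.false_eq_true, if_false, List.cons_inj_right]
    exact ih (fun y hy => h y (by simp [hy]))

theorem mem_foldl_insertBy {α : Type} (cmp : α → α → Bool) (xs : List α) (acc : List α) (y : α) :
    y ∈ xs.foldl (fun acc x => PySem.List.insertBy cmp x acc) acc ↔ y ∈ acc ∨ y ∈ xs := by
  induction xs generalizing acc with
  | nil => simp
  | cons z xs ih =>
    simp only [List.foldl_cons, ih, PySem.List.mem_insertBy, List.mem_cons]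
    tauto

theorem foldl_insertBy_partition {α : Type} (cmp : α → α → Bool) (p : α → Bool)
    (h : ∀ a b, p a = true → p b = false → cmp a b = true ∧ cmp b a = false) :
    ∀ (xs accF accR : List α), (∀ a ∈ accF, p a = true) → (∀ a ∈ accR, p a = false) →
    xs.foldl (fun acc x => PySem.List.insertBy cmp x acc) (accF ++ accR)
      = (xs.filter p).foldl (fun acc x => PySem.List.insertBy cmp x acc) accF
        ++ (xs.filter (fun x => !p x)).foldl (fun acc x => PySem.List.insertBy cmp x acc) accR := by
  intro xs
  induction xs with
  | nil => intro accF accR hF hR; simp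
  | cons x xs ih =>
    intro accF accR hF hR
    by_cases hx : p x = true
    · have hstep : PySem.List.insertBy cmp x (accF ++ accR) = PySem.List.insertBy cmp x accF ++ accR :=
        insertBy_append_left cmp x accF accR (fun z hz => (h x z hx (hR z hz)).1)
      simp only [List.foldl_cons, hstep, List.filter_cons, hx, if_pos trivial]
      have := ih (PySem.List.insertBy cmp x accF) accR
        (fun a ha => by
          rw [PySem.List.mem_insertBy] at ha
          rcases ha with rfl | ha'
          · exact hx
          · exact hF a ha') hR
      simpa [hx] using this
    · have hx' : p x = false := by simpa using hx
      have hstep : PySem.List.insertBy cmp x (accF ++ accR) = accF ++ PySem.List.insertBy cmp x accR :=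
        insertBy_append_right cmp x accF accR (fun z hz => (h z x (hF z hz) hx').2)
      simp only [List.foldl_cons, hstep, List.filter_cons, hx']
      have := ih accF (PySem.List.insertBy cmp x accR) hF
        (fun a ha => by
          rw [PySem.List.mem_insertBy] at ha
          rcases ha with rfl | ha'
          · exact hx'
          · exact hR a ha')
      simpa [hx'] using this

theorem insertBy_congr {α : Type} (cmp cmp' : α → α → Bool) (x : α) (ys : List α)
    (h : ∀ y ∈ ys, cmp x y = cmp' x y) :
    PySem.List.insertBy cmp x ys = PySem.List.insertBy cmp' x ys := by
  induction ys with
  | nil => rfl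
  | cons y ys ih =>
    have hy := h y (by simp)
    simp only [PySem.List.insertBy, ← hy]
    by_cases hc : cmp x y = true
    · simp [hc]
    · simp [hc, ih (fun z hz => h z (by simp [hz]))]

theorem foldl_insertBy_congr {α : Type} (cmp cmp' : α → α → Bool) :
    ∀ (xs acc : List α), (∀ a b, (a ∈ xs ∨ a ∈ acc) → (b ∈ xs ∨ b ∈ acc) → cmp a b = cmp' a b) →
    xs.foldl (fun acc x => PySem.List.insertBy cmp x acc) acc
      = xs.foldl (fun acc x => PySem.List.insertBy cmp' x acc) acc := by
  intro xs
  induction xs with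
  | nil => intro acc h; rfl
  | cons x xs ih =>
    intro acc h
    have hstep : PySem.List.insertBy cmp x acc = PySem.List.insertBy cmp' x acc := by
      apply insertBy_congr
      intro y hy
      exact h x y (Or.inl (by simp)) (Or.inr hy)
    simp only [List.foldl_cons, hstep]
    apply ih
    intro a b ha hb
    apply h a b
    · rcases ha with ha | ha
      · exact Or.inl (by simp [ha])
      · rw [PySem.List.mem_insertBy] at ha
        rcases ha with rfl | ha
        · exact Or.inl (by simp)
        · exact Or.inr ha
    · rcases hb with hb | hb
      · exact Or.inl (by simp [hb])
      · rw [PySem.List.mem_insertBy] at hb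
        rcases hb with rfl | hb
        · exact Or.inl (by simp)
        · exact Or.inr hb

theorem insertBy_map {α β : Type} (cmp : β → β → Bool) (f : α → β) (x : α) (ys : List α) :
    PySem.List.insertBy cmp (f x) (ys.map f)
      = (PySem.List.insertBy (fun a b => cmp (f a) (f b)) x ys).map f := by
  induction ys with
  | nil => rfl
  | cons y ys ih =>
    simp only [List.map_cons, PySem.List.insertBy]
    by_cases hc : cmp (f x) (f y) = true
    · simp [hc]
    · simp [hc, ih]

theorem foldl_insertBy_map {α β : Type} (cmp : β → β → Bool) (f : α → β) :
    ∀ (xs acc : List α),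
    (xs.map f).foldl (fun acc x => PySem.List.insertBy cmp x acc) (acc.map f)
      = (xs.foldl (fun acc x => PySem.List.insertBy (fun a b => cmp (f a) (f b)) x acc) acc).map f := by
  intro xs
  induction xs with
  | nil => intro acc; rfl
  | cons x xs ih =>
    intro acc
    simp only [List.map_cons, List.foldl_cons, insertBy_map cmp f x acc]
    exact ih _

-- bounded-buffer lemmas: trimming to k after every insertion = trimming once at the end
theorem insertBy_take {α : Type} (cmp : α → α → Bool) (x : α) :
    ∀ (l : List α) (k : Nat),
      (PySem.List.insertBy cmp x (l.take k)).take k = (PySem.List.insertBy cmp x l).take k := by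
  intro l
  induction l with
  | nil => intro k; simp
  | cons y l ih =>
    intro k
    cases k with
    | zero => simp [PySem.List.insertBy]
    | succ k =>
      simp only [List.take_succ_cons, PySem.List.insertBy]
      by_cases hc : cmp x y = true
      · cases k with
        | zero => simp [hc]
        | succ m => simp [hc, List.take_take]
      · simp only [hc, Bool.false_eq_true, if_false, List.take_succ_cons, List.cons_inj_right]
        exact ih k

theorem foldl_insertBy_take {α : Type} (cmp : α → α → Bool) (k : Nat) :
    ∀ (xs l : List α),
      xs.foldl (fun a x => (PySem.List.insertBy cmp x a).take k) (l.take k)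
        = (xs.foldl (fun a x => PySem.List.insertBy cmp x a) l).take k := by
  intro xs
  induction xs with
  | nil => intro l; rfl
  | cons x xs ih =>
    intro l
    simp only [List.foldl_cons]
    rw [insertBy_take cmp x l k]
    exact ih (PySem.List.insertBy cmp x l)

theorem foldl_insertBy_take_nil {α : Type} (cmp : α → α → Bool) (k : Nat) (xs : List α) :
    xs.foldl (fun a x => (PySem.List.insertBy cmp x a).take k) []
      = (xs.foldl (fun a x => PySem.List.insertBy cmp x a) []).take k := by
  simpa using foldl_insertBy_take cmp k xs []

theorem foldl_filter_if {α β : Type} (c : α → Bool) (f : β → α → β) :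
    ∀ (xs : List α) (init : β),
      xs.foldl (fun acc x => if c x then f acc x else acc) init = (xs.filter c).foldl f init := by
  intro xs
  induction xs with
  | nil => intro init; rfl
  | cons x xs ih =>
    intro init
    by_cases hx : c x = true
    · simp [List.filter_cons, hx, ih]
    · simp [List.filter_cons, Bool.eq_false_iff.mp (by simpa using hx), ih]

-- proof-side abbreviations for the concrete programs
def pvFi (p : String) : List (String × String) := [("type", "file"), ("text", p)]
def pvFq (p : String) : List (String × String) := [("type", "frequent"), ("text", p)]
def pvKeepB (q p : String) : Bool := !(decide (q ≠ "" ∧ ¬ (PySem.Str.isIn q (PySem.Str.lower p))))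
def pvFreqB (usage : List (String × Int)) (p : String) : Bool := decide ((PySem.Dict.mk usage).getD p 0 > 0)
def pvG (usage : List (String × Int)) (p : String) : List (String × String) :=
  if pvFreqB usage p then pvFq p else pvFi p
def pvRecD (usage : List (String × Int)) : PySem.Dict String Int :=
  (PySem.List.enumerate (PySem.Dict.keys (PySem.Dict.mk usage)).reverse).foldl
    (fun d p => PySem.Dict.insert d p.2 p.1) PySem.Dict.empty
def pvK3 (usage : List (String × Int)) (q p : String) : Int × Int × Int :=
  (pvEndDist p q, (pvRecD usage).getD p ((PySem.Dict.keys (PySem.Dict.mk usage)).length : Int),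
    -((PySem.Dict.mk usage).getD p 0))
def pvK4 (usage : List (String × Int)) (q p : String) : Int × Int × Int × Int :=
  if pvFreqB usage p then (0, pvK3 usage q p) else (1, pvEndDist p q, 0, 0)
def pvDec (usage : List (String × Int)) (q p : String) : (Int × Int × Int × Int) × List (String × String) :=
  (pvK4 usage q p, pvG usage p)
def pvTarget (file_cache : List String) (usage : List (String × Int)) (q : String) : List (List (String × String)) :=
  (((pvSortBy (fun a b => pvLt3 (pvK3 usage q a) (pvK3 usage q b))
      ((file_cache.filter (pvKeepB q)).filter (pvFreqB usage))).map pvFq)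
   ++ ((pvSortBy (fun a b => decide (pvEndDist a q < pvEndDist b q))
      ((file_cache.filter (pvKeepB q)).filter (fun p => !pvFreqB usage p))).map pvFi)).take 20

theorem pv_filter_and {α : Type} (l : List α) (f g : α → Bool) :
    l.filter (fun p => f p && g p) = (l.filter f).filter g := by
  induction l with
  | nil => rfl
  | cons x l ih =>
    by_cases hf : f x = true
    · by_cases hg : g x = true
      · simp [List.filter_cons, hf, hg, ih]
      · simp [List.filter_cons, hf, Bool.eq_false_iff.mp (by simpa using hg), ih]
    · simp [List.filter_cons, Bool.eq_false_iff.mp (by simpa using hf), ih]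

theorem pvFi_text (p : String) : (PySem.Dict.mk (pvFi p)).getD "text" "" = p := by
  simp [pvFi, PySem.Dict.getD, PySem.Dict.get?]

theorem pvRetype (p : String) :
    (PySem.Dict.insert (PySem.Dict.mk (pvFi p)) "type" "frequent").items = pvFq p := by
  simp [pvFi, pvFq, PySem.Dict.insert, PySem.Dict.contains, PySem.Dict.items]

theorem pvLt4_01 (x y : Int × Int × Int) : pvLt4 (0, x) (1, y) = true := by
  simp [pvLt4]

theorem pvLt4_10 (x y : Int × Int × Int) : pvLt4 (1, x) (0, y) = false := by
  simp [pvLt4]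

theorem pvLt4_00 (x y : Int × Int × Int) : pvLt4 (0, x) (0, y) = pvLt3 x y := by
  simp [pvLt4]

theorem pvLt4_11 (x y : Int × Int × Int) : pvLt4 (1, x) (1, y) = pvLt3 x y := by
  simp [pvLt4]

theorem pvLt3_d00 (a b : Int) : pvLt3 (a, 0, 0) (b, 0, 0) = decide (a < b) := by
  simp [pvLt3]

theorem pvG_freq (usage : List (String × Int)) (p : String) (h : pvFreqB usage p = true) :
    pvG usage p = pvFq p := by simp [pvG, h]

theorem pvG_rest (usage : List (String × Int)) (p : String) (h : pvFreqB usage p = false) :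
    pvG usage p = pvFi p := by simp [pvG, h]

theorem pvK4_freq (usage : List (String × Int)) (q p : String) (h : pvFreqB usage p = true) :
    pvK4 usage q p = (0, pvK3 usage q p) := by simp [pvK4, h]

theorem pvK4_rest (usage : List (String × Int)) (q p : String) (h : pvFreqB usage p = false) :
    pvK4 usage q p = (1, pvEndDist p q, 0, 0) := by simp [pvK4, h]

theorem pvSortBy_def {α : Type} (cmp : α → α → Bool) (xs : List α) :
    pvSortBy cmp xs = xs.foldl (fun acc x => PySem.List.insertBy cmp x acc) [] := rfl

theorem pvSortBy_map {α β : Type} (cmp : β → β → Bool) (f : α → β) (xs : List α) :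
    pvSortBy cmp (xs.map f) = (pvSortBy (fun a b => cmp (f a) (f b)) xs).map f := by
  simpa using foldl_insertBy_map cmp f xs []

theorem pv_mem_sortBy {α : Type} (cmp : α → α → Bool) (xs : List α) (y : α) :
    y ∈ pvSortBy cmp xs ↔ y ∈ xs := by
  simpa using mem_foldl_insertBy cmp xs [] y

theorem pvA_main (usage : List (String × Int)) (q : String) (F R : List String)
    (cmpF : List (String × String) → List (String × String) → Bool)
    (key : List (String × String) → Int)
    (hcF : ∀ a b, cmpF (pvFi a) (pvFi b) = pvLt3 (pvK3 usage q a) (pvK3 usage q b))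
    (hkey : ∀ a, key (pvFi a) = pvEndDist a q) :
    (((pvSortBy cmpF (F.map pvFi)).map (fun f => (PySem.Dict.insert (PySem.Dict.mk f) "type" "frequent").items)
      ++ PySem.List.sorted (R.map pvFi) key).take 20)
    = ((((pvSortBy (fun a b => pvLt3 (pvK3 usage q a) (pvK3 usage q b)) F).map pvFq)
        ++ ((pvSortBy (fun a b => decide (pvEndDist a q < pvEndDist b q)) R).map pvFi)).take 20) := by
  rw [PySem.List.sorted_eq_foldl_insertBy, ← pvSortBy_def]
  rw [pvSortBy_map cmpF pvFi F, pvSortBy_map _ pvFi R]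
  have h1 : (fun a b => cmpF (pvFi a) (pvFi b))
      = (fun a b => pvLt3 (pvK3 usage q a) (pvK3 usage q b)) := by
    funext a b; exact hcF a b
  have h2 : (fun a b => decide (key (pvFi a) < key (pvFi b)))
      = (fun a b => decide (pvEndDist a q < pvEndDist b q)) := by
    funext a b; rw [hkey, hkey]
  rw [h1, h2, List.map_map]
  have h3 : ((fun f => (PySem.Dict.insert (PySem.Dict.mk f) "type" "frequent").items) ∘ pvFi) = pvFq := by
    funext p; exact pvRetype p
  rw [h3]

theorem pvB_main (usage : List (String × Int)) (q : String) (M : List String) :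
    (((pvSortBy (fun a b => pvLt4 (pvK4 usage q a) (pvK4 usage q b)) M).map (pvG usage)).take 20)
    = ((((pvSortBy (fun a b => pvLt3 (pvK3 usage q a) (pvK3 usage q b)) (M.filter (pvFreqB usage))).map pvFq)
        ++ ((pvSortBy (fun a b => decide (pvEndDist a q < pvEndDist b q)) (M.filter (fun p => !pvFreqB usage p))).map pvFi)).take 20) := by
  have hpart : pvSortBy (fun a b => pvLt4 (pvK4 usage q a) (pvK4 usage q b)) M
      = pvSortBy (fun a b => pvLt4 (pvK4 usage q a) (pvK4 usage q b)) (M.filter (pvFreqB usage))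
        ++ pvSortBy (fun a b => pvLt4 (pvK4 usage q a) (pvK4 usage q b)) (M.filter (fun p => !pvFreqB usage p)) := by
    have := foldl_insertBy_partition (fun a b => pvLt4 (pvK4 usage q a) (pvK4 usage q b)) (pvFreqB usage)
      (fun a b ha hb => by
        beta_reduce
        rw [pvK4_freq usage q a ha, pvK4_rest usage q b hb]
        exact ⟨pvLt4_01 _ _, pvLt4_10 _ _⟩)
      M [] [] (by simp) (by simp)
    simpa [pvSortBy_def] using this
  rw [hpart, List.map_append]
  have hF : (pvSortBy (fun a b => pvLt4 (pvK4 usage q a) (pvK4 usage q b)) (M.filter (pvFreqB usage))).map (pvG usage)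
      = (pvSortBy (fun a b => pvLt3 (pvK3 usage q a) (pvK3 usage q b)) (M.filter (pvFreqB usage))).map pvFq := by
    have hcongr : pvSortBy (fun a b => pvLt4 (pvK4 usage q a) (pvK4 usage q b)) (M.filter (pvFreqB usage))
        = pvSortBy (fun a b => pvLt3 (pvK3 usage q a) (pvK3 usage q b)) (M.filter (pvFreqB usage)) := by
      have := foldl_insertBy_congr (fun a b => pvLt4 (pvK4 usage q a) (pvK4 usage q b))
        (fun a b => pvLt3 (pvK3 usage q a) (pvK3 usage q b)) (M.filter (pvFreqB usage)) []
        (fun a b ha hb => by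
          have ha' : pvFreqB usage a = true := by
            rcases ha with ha | ha
            · exact (List.mem_filter.mp ha).2
            · simp at ha
          have hb' : pvFreqB usage b = true := by
            rcases hb with hb | hb
            · exact (List.mem_filter.mp hb).2
            · simp at hb
          beta_reduce
          rw [pvK4_freq usage q a ha', pvK4_freq usage q b hb', pvLt4_00])
      simpa [pvSortBy_def] using this
    rw [hcongr]
    apply List.map_congr_left
    intro y hy
    have : y ∈ M.filter (pvFreqB usage) := (pv_mem_sortBy _ _ y).mp hy
    exact pvG_freq usage y (List.mem_filter.mp this).2
  have hR : (pvSortBy (fun a b => pvLt4 (pvK4 usage q a) (pvK4 usage q b)) (M.filter (fun p => !pvFreqB usage p))).map (pvG usage)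
      = (pvSortBy (fun a b => decide (pvEndDist a q < pvEndDist b q)) (M.filter (fun p => !pvFreqB usage p))).map pvFi := by
    have hcongr : pvSortBy (fun a b => pvLt4 (pvK4 usage q a) (pvK4 usage q b)) (M.filter (fun p => !pvFreqB usage p))
        = pvSortBy (fun a b => decide (pvEndDist a q < pvEndDist b q)) (M.filter (fun p => !pvFreqB usage p)) := by
      have := foldl_insertBy_congr (fun a b => pvLt4 (pvK4 usage q a) (pvK4 usage q b))
        (fun a b => decide (pvEndDist a q < pvEndDist b q)) (M.filter (fun p => !pvFreqB usage p)) []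
        (fun a b ha hb => by
          have ha' : pvFreqB usage a = false := by
            rcases ha with ha | ha
            · simpa using (List.mem_filter.mp ha).2
            · simp at ha
          have hb' : pvFreqB usage b = false := by
            rcases hb with hb | hb
            · simpa using (List.mem_filter.mp hb).2
            · simp at hb
          beta_reduce
          rw [pvK4_rest usage q a ha', pvK4_rest usage q b hb', pvLt4_11, pvLt3_d00])
      simpa [pvSortBy_def] using this
    rw [hcongr]
    apply List.map_congr_left
    intro y hy
    have : y ∈ M.filter (fun p => !pvFreqB usage p) := (pv_mem_sortBy _ _ y).mp hy
    exact pvG_rest usage y (by simpa using (List.mem_filter.mp this).2)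
  rw [hF, hR]

theorem pvA_eq (file_cache : List String) (usage : List (String × Int)) (q : String) :
    sort_suggestions_py file_cache usage q = pvTarget file_cache usage q := by
  have hbodyA : (fun (acc : List (List (String × String)) × List (List (String × String))) path =>
        if q ≠ "" ∧ ¬ (PySem.Str.isIn q (PySem.Str.lower path)) then acc
        else
          if (PySem.Dict.mk usage).getD path 0 > 0 then (acc.1 ++ [[("type", "file"), ("text", path)]], acc.2)
          else (acc.1, acc.2 ++ [[("type", "file"), ("text", path)]]))
      = (fun acc path =>
          (if pvKeepB q path && pvFreqB usage path then acc.1 ++ [pvFi path] else acc.1,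
           if pvKeepB q path && !pvFreqB usage path then acc.2 ++ [pvFi path] else acc.2)) := by
    funext acc path
    by_cases hq : q ≠ "" ∧ ¬ (PySem.Str.isIn q (PySem.Str.lower path) = true)
    · have hk : pvKeepB q path = false := by
        simp only [pvKeepB, Bool.not_eq_false', decide_eq_true_eq]; exact hq
      rw [if_pos hq]
      simp [hk]
    · have hk : pvKeepB q path = true := by
        simp only [pvKeepB, Bool.not_eq_true', decide_eq_false_iff_not]; exact hq
      rw [if_neg hq]
      by_cases hf : (PySem.Dict.mk usage).getD path 0 > 0
      · have hfb : pvFreqB usage path = true := by simp [pvFreqB, hf]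
        rw [if_pos hf]
        simp [hk, hfb, pvFi]
      · have hfb : pvFreqB usage path = false := by simp [pvFreqB]; omega
        rw [if_neg hf]
        simp [hk, hfb, pvFi]
  have hA : file_cache.foldl
      (fun (acc : List (List (String × String)) × List (List (String × String))) path =>
        if q ≠ "" ∧ ¬ (PySem.Str.isIn q (PySem.Str.lower path)) then acc
        else
          if (PySem.Dict.mk usage).getD path 0 > 0 then (acc.1 ++ [[("type", "file"), ("text", path)]], acc.2)
          else (acc.1, acc.2 ++ [[("type", "file"), ("text", path)]]))
      ([], [])
      = (((file_cache.filter (pvKeepB q)).filter (pvFreqB usage)).map pvFi,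
         ((file_cache.filter (pvKeepB q)).filter (fun p => !pvFreqB usage p)).map pvFi) := by
    rw [hbodyA,
      PySem.List.foldl_prod_mk
        (f := fun a path => if pvKeepB q path && pvFreqB usage path then a ++ [pvFi path] else a)
        (g := fun a path => if pvKeepB q path && !pvFreqB usage path then a ++ [pvFi path] else a)]
    rw [PySem.List.foldl_append_if, PySem.List.foldl_append_if, pv_filter_and, pv_filter_and]
    simp
  simp only [sort_suggestions_py, pvTarget]
  rw [hA]
  exact pvA_main usage q _ _ _ _
    (fun a b => by simp [pvFi_text, pvK3, pvRecD])
    (fun a => by simp [pvFi_text])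

theorem pvB_eq (file_cache : List String) (usage : List (String × Int)) (q : String) :
    sort_suggestions_py_alt file_cache usage q = pvTarget file_cache usage q := by
  have hbody : (fun (buf : List ((Int × Int × Int × Int) × List (String × String))) path =>
        if q ≠ "" ∧ ¬ (PySem.Str.isIn q (PySem.Str.lower path)) then buf
        else
          (PySem.List.insertBy (fun a b => pvLt4 a.1 b.1)
            (if (PySem.Dict.mk usage).getD path 0 > 0 then
              ((0, pvEndDist path q,
                 ((PySem.List.enumerate (PySem.Dict.keys (PySem.Dict.mk usage)).reverse).foldl
                    (fun d p => PySem.Dict.insert d p.2 p.1) PySem.Dict.empty).getD path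
                   ((PySem.Dict.keys (PySem.Dict.mk usage)).length : Int),
                 -((PySem.Dict.mk usage).getD path 0)),
               [("type", "frequent"), ("text", path)])
             else
              (((1 : Int), pvEndDist path q, (0 : Int), (0 : Int)),
               [("type", "file"), ("text", path)])) buf).take 20)
      = (fun buf path =>
          if pvKeepB q path
          then (PySem.List.insertBy (fun a b => pvLt4 a.1 b.1) (pvDec usage q path) buf).take 20
          else buf) := by
    funext buf path
    by_cases hq : q ≠ "" ∧ ¬ (PySem.Str.isIn q (PySem.Str.lower path) = true)
    · have hk : pvKeepB q path = false := by
        simp only [pvKeepB, Bool.not_eq_false', decide_eq_true_eq]; exact hq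
      rw [if_pos hq]
      simp [hk]
    · have hk : pvKeepB q path = true := by
        simp only [pvKeepB, Bool.not_eq_true', decide_eq_false_iff_not]; exact hq
      rw [if_neg hq]
      by_cases hf : (PySem.Dict.mk usage).getD path 0 > 0
      · have hfb : pvFreqB usage path = true := by simp [pvFreqB, hf]
        rw [if_pos hf]
        simp [hk, pvDec, pvK4_freq usage q path hfb, pvG_freq usage path hfb, pvK3, pvRecD, pvFq]
      · have hfb : pvFreqB usage path = false := by simp [pvFreqB]; omega
        rw [if_neg hf]
        simp [hk, pvDec, pvK4_rest usage q path hfb, pvG_rest usage path hfb, pvFi]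
  simp only [sort_suggestions_py_alt]
  rw [hbody, foldl_filter_if]
  rw [← List.foldl_map (f := pvDec usage q)
        (g := fun (a : List ((Int × Int × Int × Int) × List (String × String))) x =>
          (PySem.List.insertBy (fun a b => pvLt4 a.1 b.1) x a).take 20)]
  rw [foldl_insertBy_take_nil, ← pvSortBy_def]
  rw [pvSortBy_map (fun a b => pvLt4 a.1 b.1) (pvDec usage q)]
  rw [List.map_take, List.map_map]
  have hsnd : ((fun (p : (Int × Int × Int × Int) × List (String × String)) => p.2) ∘ pvDec usage q) = pvG usage := rfl
  have hcmp : (fun a b => pvLt4 (pvDec usage q a).1 (pvDec usage q b).1)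
      = (fun a b => pvLt4 (pvK4 usage q a) (pvK4 usage q b)) := rfl
  rw [hsnd, hcmp]
  exact pvB_main usage q _

-- ===== VERDICT (by name: the statement is the Claim_ definition above) =====
theorem sort_suggestions_py_spec : Claim_equal_sort_suggestions_py := by
  intro file_cache usage q _hdom
  unfold Spec_sort_suggestions_py
  rw [pvA_eq, pvB_eq]
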